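-- pv_equiv track=rewrite | github.com/beomwon/Algorithm | 프로그래머스/unrated/181857. 배열의 길이를 2의 거듭제곱으로 만들기/배열의 길이를 2의 거듭제곱으로 만들기.py | solution
-- ===== SOURCE A (Python) =====
-- def solution(arr):
--     _len, t = len(arr), 0
--     while True:
--         if _len <= 2**t: break
--         t += 1
--     result = [0] * (2**t)
--     result[:_len] = arr
--     return result
-- ===== SOURCE B (Python) =====
-- def solution(arr):
--     size = 1 << (max(len(arr), 1) - 1).bit_length()
--     return arr + [0] * (size - len(arr))
-- ===== Notes on version B (the rewrite author's own statement) =====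
-- stated objective: idiomatic
-- what changed: Replaces the incrementing while-loop exponent search and allocate-then-slice-assign pattern with a closed-form padded length via bit_length and direct concatenation arr + [0]*(size-len).
import Mathlib
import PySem

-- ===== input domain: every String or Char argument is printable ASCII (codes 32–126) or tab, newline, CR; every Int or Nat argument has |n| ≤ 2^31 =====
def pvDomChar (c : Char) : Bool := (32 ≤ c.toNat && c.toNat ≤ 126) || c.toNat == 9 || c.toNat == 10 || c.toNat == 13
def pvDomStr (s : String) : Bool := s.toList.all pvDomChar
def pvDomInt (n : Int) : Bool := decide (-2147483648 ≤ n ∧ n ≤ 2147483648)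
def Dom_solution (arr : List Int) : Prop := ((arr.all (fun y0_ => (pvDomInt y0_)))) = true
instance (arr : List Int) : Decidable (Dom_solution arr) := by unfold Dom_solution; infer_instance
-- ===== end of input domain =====

-- B pads with a closed-form bit_length size instead of A's while-loop exponent search; return values proved equal on all inputs.

-- ===== PORT A =====
-- the 'while True: if _len <= 2**t: break; t += 1' loop, returning the final t
def solutionLoop (n t : Nat) : Nat :=
  if n ≤ 2 ^ t then t else solutionLoop n (t + 1)
termination_by n - 2 ^ t
decreasing_by
  have h1 : 2 ^ t < 2 ^ (t + 1) := Nat.pow_lt_pow_right (by norm_num) (Nat.lt_succ_self t)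
  omega

def solution (arr : List Int) : List Int :=
  let _len := arr.length
  let t := solutionLoop _len 0
  -- result = [0] * (2**t); result[:_len] = arr  (slice assignment with _len ≤ 2**t)
  let result := List.replicate (2 ^ t) (0 : Int)
  arr ++ result.drop _len

-- ===== PORT B =====
def solution_alt (arr : List Int) : List Int :=
  -- size = 1 << (max(len(arr), 1) - 1).bit_length()  (bit_length of a Nat = Nat.size)
  let size := 1 <<< Nat.size (max arr.length 1 - 1)
  arr ++ List.replicate (size - arr.length) (0 : Int)

-- ===== PRECONDITION & SPEC =====
def Spec_solution (arr : List Int) (out : List Int) : Prop := out = solution_alt arr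
instance (arr : List Int) (out : List Int) : Decidable (Spec_solution arr out) := by unfold Spec_solution; infer_instance

-- ===== CLAIM (what is proved, stated in full; the proofs are below) =====
def Claim_equal_solution : Prop := ∀ (arr : List Int), Dom_solution arr → Spec_solution arr (solution arr)

-- ===== LEMMAS AND PROOFS =====

-- A's loop condition n ≤ 2^t is equivalent to Nat.size (n-1) ≤ t (Nat subtraction)
theorem loop_cond_iff (n t : Nat) : n ≤ 2 ^ t ↔ Nat.size (n - 1) ≤ t := by
  rw [Nat.size_le]
  have h : 1 ≤ 2 ^ t := Nat.one_le_two_pow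
  omega

theorem solutionLoop_eq (n : Nat) : ∀ k t, Nat.size (n - 1) - t = k → t ≤ Nat.size (n - 1) →
    solutionLoop n t = Nat.size (n - 1) := by
  intro k
  induction k with
  | zero =>
    intro t hk ht
    have : t = Nat.size (n - 1) := by omega
    subst this
    rw [solutionLoop, if_pos ((loop_cond_iff n _).mpr le_rfl)]
  | succ k ih =>
    intro t hk ht
    rw [solutionLoop]
    split
    · next h => exact le_antisymm ht ((loop_cond_iff n t).mp h)
    · next h =>
      have ht' : ¬ Nat.size (n - 1) ≤ t := fun h' => h ((loop_cond_iff n t).mpr h')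
      exact ih (t + 1) (by omega) (by omega)

theorem size_max_sub (n : Nat) : Nat.size (max n 1 - 1) = Nat.size (n - 1) := by
  rcases Nat.eq_zero_or_pos n with h | h
  · subst h; rfl
  · congr 1; omega

-- ===== VERDICT (by name: the statement is the Claim_ definition above) =====
theorem solution_spec : Claim_equal_solution := by
  intro arr _
  unfold Spec_solution solution solution_alt
  simp only
  rw [solutionLoop_eq arr.length (Nat.size (arr.length - 1) - 0) 0 rfl (Nat.zero_le _),
      size_max_sub, Nat.one_shiftLeft, List.drop_replicate]
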